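-- pv_equiv track=rewrite | github.com/Chochanguk/CoTe_Practice | 프로그래머스/2/131704. 택배상자/택배상자.py | solution
-- ===== SOURCE A (Python) =====
-- def solution(order):
--     answer = 0
--     n = len(order)
--     container = [i for i in range(1, n+1)]
--     stack = []
--     idx = 0  # order의 인덱스
--
--     for box in container:
--         stack.append(box)
--
--         # 스택의 top이 order[idx]와 같을 경우 계속 pop
--         while stack and stack[-1] == order[idx]:
--             stack.pop()
--             idx += 1
--             answer += 1
--             if idx == n:
--                 break
--
--     return answer
-- ===== SOURCE B (Python) =====
-- def solution(order):
--     # Loop over the demanded targets, pushing boxes on demand, instead of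
--     # looping over the boxes and popping greedily.
--     answer = 0
--     n = len(order)
--     box = 1          # next box to push
--     stack = []
--     for target in order:
--         while box <= n and (not stack or stack[-1] != target):
--             stack.append(box)
--             box += 1
--         if stack and stack[-1] == target:
--             stack.pop()
--             answer += 1
--         else:
--             break
--     return answer
-- ===== Notes on version B (the rewrite author's own statement) =====
-- stated objective: alternative
-- what changed: B iterates over the demanded targets with a push-boxes-on-demand inner loop and early exit, instead of A's loop over all boxes with a greedy pop-while-matching inner loop over the order index.
import Mathlib
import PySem

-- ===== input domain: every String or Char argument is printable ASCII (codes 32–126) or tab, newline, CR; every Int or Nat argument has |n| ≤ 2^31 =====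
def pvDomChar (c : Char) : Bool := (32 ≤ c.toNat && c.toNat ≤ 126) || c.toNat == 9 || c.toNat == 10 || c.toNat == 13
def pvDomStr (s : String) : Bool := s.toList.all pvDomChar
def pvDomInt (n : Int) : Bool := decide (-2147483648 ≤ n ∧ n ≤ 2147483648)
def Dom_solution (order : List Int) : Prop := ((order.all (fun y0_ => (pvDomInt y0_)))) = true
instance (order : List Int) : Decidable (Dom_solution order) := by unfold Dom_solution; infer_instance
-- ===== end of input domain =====

-- B restructures the stack simulation: it loops over the demanded targets, pushing
-- boxes on demand, instead of A's loop over all boxes with a greedy pop inner loop.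

-- ===== PORT A =====
-- inner `while stack and stack[-1] == order[idx]: pop; idx+=1; answer+=1; if idx==n break`.
-- Stack is held head-as-top. `order[idx]` is PySem.List.pyGet?; the `none` (IndexError)
-- case is treated as a mismatch — it is unreachable, since idx reaches n only after all
-- n boxes were pushed, whereupon the inner loop has already broken.
def popA (order : List Int) : List Int → Int → Int → (List Int × Int × Int)
  | [], idx, ans => ([], idx, ans)
  | t :: rest, idx, ans =>
    if PySem.List.pyGet? order idx = some t then
      if idx + 1 = (order.length : Int) then (rest, idx + 1, ans + 1)
      else popA order rest (idx + 1) (ans + 1)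
    else (t :: rest, idx, ans)

def solution (order : List Int) : Int :=
  let n : Int := order.length
  let container := PySem.List.pyRange 1 (n + 1) 1
  (container.foldl
    (fun (st : List Int × Int × Int) box => popA order (box :: st.1) st.2.1 st.2.2)
    ([], 0, 0)).2.2

-- ===== PORT B =====
-- inner `while box <= n and (not stack or stack[-1] != target): push box; box += 1`
def pushB (n target : Int) (box : Int) (stack : List Int) : Int × List Int :=
  if box ≤ n ∧ (stack = [] ∨ stack.head? ≠ some target) then
    pushB n target (box + 1) (box :: stack)
  else (box, stack)
termination_by (n + 1 - box).toNat
decreasing_by omega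

-- outer `for target in order`, with the early `break`
def goB (n : Int) : List Int → Int → List Int → Int → Int
  | [], _, _, ans => ans
  | t :: rest, box, stack, ans =>
    let p := pushB n t box stack
    match p.2 with
    | s :: s' => if s = t then goB n rest p.1 s' (ans + 1) else ans
    | [] => ans

def solution_alt (order : List Int) : Int :=
  goB (order.length : Int) order 1 [] 0

-- ===== PRECONDITION & SPEC =====
def Spec_solution (order : List Int) (out : Int) : Prop := out = solution_alt order
instance (order : List Int) (out : Int) : Decidable (Spec_solution order out) := by unfold Spec_solution; infer_instance

-- ===== CLAIM (what is proved, stated in full; the proofs are below) =====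
def Claim_equal_solution : Prop := ∀ (order : List Int), Dom_solution order → Spec_solution order (solution order)

-- ===== LEMMAS AND PROOFS =====

-- Reference machine: pop the top if it matches the next target, else push the next
-- box, else stop; returns the number of delivered targets.
def run : List Int → List Int → List Int → Int
  | _, [], _ => 0
  | boxes, t :: ts, s :: rest =>
    if s = t then 1 + run boxes ts rest
    else match boxes with
      | [] => 0
      | b :: bs => run bs (t :: ts) (b :: s :: rest)
  | boxes, t :: ts, [] =>
    match boxes with
    | [] => 0
    | b :: bs => run bs (t :: ts) [b]
termination_by boxes ts _ => boxes.length + ts.length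
decreasing_by all_goals (simp; try omega)


-- run on an empty target list / empty boxes convenience facts
theorem run_nil_ts (boxes stack : List Int) : run boxes [] stack = 0 := by
  cases stack <;> simp [run]

theorem run_pop (boxes ts s' : List Int) (s : Int) :
    run boxes (s :: ts) (s :: s') = 1 + run boxes ts s' := by
  rw [run.eq_def]; simp

theorem run_push_cons (bs ts s' : List Int) (b s t : Int) (h : s ≠ t) :
    run (b :: bs) (t :: ts) (s :: s') = run bs (t :: ts) (b :: s :: s') := by
  rw [run.eq_def]; simp [h]

theorem run_push_nil (bs ts : List Int) (b t : Int) :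
    run (b :: bs) (t :: ts) [] = run bs (t :: ts) [b] := by
  rw [run.eq_def]

theorem run_stuck_cons (ts s' : List Int) (s t : Int) (h : s ≠ t) :
    run [] (t :: ts) (s :: s') = 0 := by
  rw [run.eq_def]; simp [h]

theorem run_stuck_nil (ts : List Int) (t : Int) :
    run [] (t :: ts) [] = 0 := by
  rw [run.eq_def]

-- stopping condition of A's inner while at stack/index state
def StopA (order : List Int) (i : Nat) : List Int → Prop
  | [] => True
  | t :: _ => order[i]? ≠ some t

-- B1: pushing boxes to reach the target commutes with `run`
theorem pushB_run (n t : Int) (box : Int) (stack ts : List Int) :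
    run (PySem.List.pyRange box (n+1) 1) (t :: ts) stack
      = run (PySem.List.pyRange (pushB n t box stack).1 (n+1) 1) (t :: ts) (pushB n t box stack).2 := by
  induction box, stack using pushB.induct n t with
  | case1 box stack hcond ih =>
    rw [pushB, if_pos hcond]
    rw [PySem.List.pyRange_one_cons (by omega : box < n + 1)]
    cases stack with
    | nil =>
      rw [run_push_nil]
      exact ih
    | cons s rest =>
      have hsne : s ≠ t := by
        rcases hcond.2 with h0 | hne
        · exact absurd h0 (by simp)
        · simpa using hne
      rw [run_push_cons _ _ _ _ _ _ hsne]
      exact ih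
  | case2 box stack hcond =>
    rw [pushB, if_neg hcond]

-- B2: pushB's exit state falsifies its loop condition
theorem pushB_post (n t : Int) (box : Int) (stack : List Int) :
    ¬ ((pushB n t box stack).1 ≤ n ∧ ((pushB n t box stack).2 = [] ∨ (pushB n t box stack).2.head? ≠ some t)) := by
  induction box, stack using pushB.induct n t with
  | case1 box stack hcond ih => rw [pushB, if_pos hcond]; exact ih
  | case2 box stack hcond => rw [pushB, if_neg hcond]; exact hcond

-- B3: goB computes `run` on the remaining range of boxes
theorem goB_run (n : Int) (ts : List Int) (box : Int) (stack : List Int) (ans : Int) :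
    goB n ts box stack ans = ans + run (PySem.List.pyRange box (n+1) 1) ts stack := by
  induction ts generalizing box stack ans with
  | nil => simp [goB, run_nil_ts]
  | cons t rest ih =>
    rw [goB, pushB_run n t box stack rest]
    have hpost := pushB_post n t box stack
    rcases hq : pushB n t box stack with ⟨box', stack'⟩
    rw [hq] at hpost
    simp only at hpost ⊢
    cases stack' with
    | nil =>
      have hbox : n < box' := by
        by_contra h; exact hpost ⟨by omega, Or.inl rfl⟩
      simp [PySem.List.pyRange_one_eq_nil (by omega : n + 1 ≤ box'), run_stuck_nil]
    | cons s s' =>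
      by_cases hst : s = t
      · subst hst
        simp only [ite_true, ih, run_pop]
        ring
      · have hbox : n < box' := by
          by_contra h; exact hpost ⟨by omega, Or.inr (by simp [hst])⟩
        rw [PySem.List.pyRange_one_eq_nil (by omega : n + 1 ≤ box')]
        simp [hst, run_stuck_cons _ _ _ _ hst]

-- A1: the effect of A's pop loop, measured against `run`
theorem popA_run (order : List Int) (stack : List Int) (i : Nat) (ans : Int)
    (hi : i ≤ order.length) :
    ∃ (k : Nat) (st' : List Int),
      popA order stack (i : Int) ans = (st', ((i + k : Nat) : Int), ans + (k : Int)) ∧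
      i + k ≤ order.length ∧ StopA order (i + k) st' ∧
      ∀ boxes : List Int, run boxes (order.drop i) stack
        = (k : Int) + run boxes (order.drop (i + k)) st' := by
  induction stack generalizing i ans with
  | nil =>
    exact ⟨0, [], by simp [popA], by omega, trivial, fun boxes => by simp⟩
  | cons t rest ih =>
    by_cases h : PySem.List.pyGet? order (i : Int) = some t
    · have hidx : order[i]? = some t := by rwa [PySem.List.pyGet?_natCast] at h
      have hlt : i < order.length := by
        rcases List.getElem?_eq_some_iff.mp hidx with ⟨hl, _⟩; exact hl
      have hti : order[i] = t := by
        rcases List.getElem?_eq_some_iff.mp hidx with ⟨_, he⟩; exact he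
      have hdrop : order.drop i = t :: order.drop (i + 1) := by
        rw [List.drop_eq_getElem_cons hlt, hti]
      by_cases hend : (i : Int) + 1 = (order.length : Int)
      · have hi1 : i + 1 = order.length := by exact_mod_cast hend
        refine ⟨1, rest, ?_, by omega, ?_, ?_⟩
        · simp [popA, h, hend]
        · cases rest with
          | nil => trivial
          | cons u us =>
            show order[i + 1]? ≠ some u
            rw [List.getElem?_eq_none (by omega)]; simp
        · intro boxes; rw [hdrop, run_pop]; push_cast; ring
      · obtain ⟨k, st', heq, hle, hstop, hrun⟩ := ih (i + 1) (ans + 1) (by omega)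
        have hcast : ((i : Int) + 1) = ((i + 1 : Nat) : Int) := by push_cast; ring
        refine ⟨k + 1, st', ?_, by omega, ?_, ?_⟩
        · rw [popA, if_pos h, if_neg hend, hcast, heq]
          simp only [Prod.mk.injEq]
          refine ⟨trivial, by push_cast; ring, by push_cast; ring⟩
        · have : i + (k + 1) = (i + 1) + k := by omega
          rw [this]; exact hstop
        · intro boxes
          rw [hdrop, run_pop, hrun boxes,
            show i + (k + 1) = (i + 1) + k from by omega]
          push_cast; ring
    · have h' : ¬ order[i]? = some t := fun hc => h (by rw [PySem.List.pyGet?_natCast, hc])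
      exact ⟨0, t :: rest, by simp [popA, h'], by omega, h', fun boxes => by simp⟩

-- A2: A's fold over the boxes computes `run`
theorem foldA_run (order : List Int) (boxes stack : List Int) (i : Nat) (ans : Int)
    (hi : i ≤ order.length) (hs : StopA order i stack) :
    (boxes.foldl (fun (st : List Int × Int × Int) box => popA order (box :: st.1) st.2.1 st.2.2)
        (stack, (i : Int), ans)).2.2
      = ans + run boxes (order.drop i) stack := by
  induction boxes generalizing stack i ans with
  | nil =>
    simp only [List.foldl_nil]
    rcases hdi : order.drop i with _ | ⟨t', ts⟩
    · rw [run_nil_ts]; ring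
    · have hlt : i < order.length := by
        by_contra hc
        rw [List.drop_eq_nil_iff.mpr (by omega)] at hdi; cases hdi
      have ht' : order[i] = t' := by
        have := List.drop_eq_getElem_cons hlt
        rw [hdi] at this; exact (List.cons.injEq _ _ _ _ ▸ this).1.symm
      cases stack with
      | nil => rw [run_stuck_nil]; ring
      | cons s rest =>
        have hs : s ≠ t' := by
          intro hc; subst hc
          exact hs (by rw [List.getElem?_eq_getElem hlt, ht'])
        rw [run_stuck_cons _ _ _ _ hs]; ring
  | cons b bs ih =>
    simp only [List.foldl_cons]
    obtain ⟨k, st', heq, hle, hstop, hrun⟩ := popA_run order (b :: stack) i ans hi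
    rw [heq, ih st' (i + k) (ans + (k : Int)) hle hstop]
    rcases hdi : order.drop i with _ | ⟨t', ts⟩
    · have h0 : (k : Int) + run bs (order.drop (i + k)) st' = 0 := by
        rw [← hrun bs, hdi, run_nil_ts]
      rw [run_nil_ts]
      omega
    · have hlt : i < order.length := by
        by_contra hc
        rw [List.drop_eq_nil_iff.mpr (by omega)] at hdi; cases hdi
      have ht' : order[i] = t' := by
        have := List.drop_eq_getElem_cons hlt
        rw [hdi] at this; exact (List.cons.injEq _ _ _ _ ▸ this).1.symm
      have hpush : run (b :: bs) (t' :: ts) stack = run bs (t' :: ts) (b :: stack) := by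
        cases stack with
        | nil => exact run_push_nil _ _ _ _
        | cons s rest =>
          refine run_push_cons _ _ _ _ _ _ ?_
          intro hc; subst hc
          exact hs (by rw [List.getElem?_eq_getElem hlt, ht'])
      rw [hpush, ← hdi, hrun bs]
      ring

theorem solution_spec : Claim_equal_solution := by
  intro order _
  unfold Spec_solution solution solution_alt
  have hA := foldA_run order (PySem.List.pyRange 1 ((order.length : Int) + 1) 1) [] 0 0
    (by omega) (by trivial)
  have hB := goB_run (order.length : Int) order 1 [] 0
  simp only [Nat.cast_zero] at hA
  simp [hA, hB]
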